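-- pv_equiv track=rewrite | github.com/Vikrantpathak7/python | common friends finder.py | find_common_and_all_friends
-- ===== SOURCE A (Python) =====
-- def find_common_and_all_friends(friends):
--     if not friends:
--         return set(), set()
--     all_friends = set()
--     common_friends = set.intersection(*friends.values()) if len(friends) > 1 else set()
--     for friend_set in friends.values():
--         all_friends.update(friend_set)
--     return common_friends, all_friends
-- ===== SOURCE B (Python) =====
-- def find_common_and_all_friends(friends):
--     if not friends:
--         return set(), set()
--     n = len(friends)
--     counts = {}
--     for s in friends.values():
--         for f in s:
--             counts[f] = counts.get(f, 0) + 1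
--     common = {f for f, c in counts.items() if c == n} if n > 1 else set()
--     return common, set(counts)
-- ===== Notes on version B (the rewrite author's own statement) =====
-- stated objective: alternative
-- what changed: Replaces the n-ary set.intersection plus a separate union loop by a single pass that builds a membership-count histogram over all friend sets; the common friends are the names counted len(friends) times and the all-friends set is the histogram's key set.
import Mathlib
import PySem

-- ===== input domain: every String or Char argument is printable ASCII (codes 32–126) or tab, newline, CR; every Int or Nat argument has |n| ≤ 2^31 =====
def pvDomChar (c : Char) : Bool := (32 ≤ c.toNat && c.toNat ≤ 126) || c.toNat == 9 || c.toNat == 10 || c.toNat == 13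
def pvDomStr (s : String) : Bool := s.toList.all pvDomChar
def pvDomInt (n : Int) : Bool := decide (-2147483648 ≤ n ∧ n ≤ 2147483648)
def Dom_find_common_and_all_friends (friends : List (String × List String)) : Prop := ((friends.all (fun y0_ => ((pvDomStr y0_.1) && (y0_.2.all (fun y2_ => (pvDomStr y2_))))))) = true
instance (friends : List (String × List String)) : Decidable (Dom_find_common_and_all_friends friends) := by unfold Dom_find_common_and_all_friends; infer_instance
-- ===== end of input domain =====

-- B replaces A's n-ary set.intersection + separate union loop by one membership-count
-- histogram pass (alternative algorithm, same asymptotic cost).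


-- ===== PORT A =====
-- Each dict value is a Python set; PySem.Set.ofList normalizes its list representation
-- (exact: the List String for a set[str] holds its distinct elements).
def find_common_and_all_friends (friends : List (String × List String)) : List String × List String :=
  if friends.isEmpty then ([], [])
  else
    let d := PySem.Dict.ofList friends
    let common : List String :=
      if 1 < d.size then
        -- set.intersection(*friends.values()): the first set intersected with the rest
        match d.values with
        | [] => []   -- unreachable: a non-empty dict has at least one value
        | v :: vs => vs.foldl (fun acc s => PySem.Set.inter acc s) (PySem.Set.ofList v)
      else []
    let allF := d.values.foldl (fun acc s => PySem.Set.update acc s) ([] : List String)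
    (common, allF)

-- ===== PORT B =====
-- counts[f] = in how many friend sets f occurs; common = counted len(friends) times,
-- all = the histogram's key set (insertion order = first occurrence).
def find_common_and_all_friends_alt (friends : List (String × List String)) : List String × List String :=
  if friends.isEmpty then ([], [])
  else
    let d := PySem.Dict.ofList friends
    let counts : PySem.Dict String Int :=
      d.values.foldl
        (fun c s => (PySem.Set.ofList s).foldl (fun c f => c.modify f 0 (· + 1)) c)
        PySem.Dict.empty
    let common : List String :=
      if 1 < d.size then (counts.items.filter (fun p => p.2 == (d.size : Int))).map Prod.fst
      else []
    (common, counts.keys)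

-- ===== PRECONDITION & SPEC =====
def Spec_find_common_and_all_friends (friends : List (String × List String)) (out : List String × List String) : Prop := out = find_common_and_all_friends_alt friends
instance (friends : List (String × List String)) (out : List String × List String) : Decidable (Spec_find_common_and_all_friends friends out) := by unfold Spec_find_common_and_all_friends; infer_instance

-- ===== CLAIM (what is proved, stated in full; the proofs are below) =====
def Claim_equal_find_common_and_all_friends : Prop := ∀ (friends : List (String × List String)), Dom_find_common_and_all_friends friends → Spec_find_common_and_all_friends friends (find_common_and_all_friends friends)

-- ===== LEMMAS AND PROOFS =====

-- updating a set with set(t) is updating it with t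
theorem pv_update_ofList (s : PySem.Set String) (t : List String) :
    PySem.Set.update s (PySem.Set.ofList t) = PySem.Set.update s t := by
  rw [PySem.Set.update_eq_append_filter, PySem.Set.update_eq_append_filter,
      PySem.Set.ofList_ofList]

-- the union loop is set() of the concatenation of the (normalized) friend sets
theorem pv_foldl_update (vals : List (List String)) (s : PySem.Set String) :
    vals.foldl (fun acc t => PySem.Set.update acc t) s
      = PySem.Set.update s ((vals.map PySem.Set.ofList).flatten) := by
  induction vals generalizing s with
  | nil => simp [PySem.Set.update]
  | cons v vs ih =>
      simp only [List.foldl_cons, List.map_cons, List.flatten_cons]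
      rw [ih, PySem.Set.update_append, pv_update_ofList]

-- B's counts dict IS the Counter of the flattened normalized friend sets
theorem pv_counts_eq_counter (vals : List (List String)) :
    vals.foldl
        (fun c s => (PySem.Set.ofList s).foldl (fun c f => c.modify f 0 (· + 1)) c)
        (PySem.Dict.empty : PySem.Dict String Int)
      = PySem.Dict.counter ((vals.map PySem.Set.ofList).flatten) := by
  rw [PySem.Dict.counter_eq_foldl, List.foldl_flatten, List.foldl_map]

-- how often a friend occurs in the flattened sets = in how many sets it occurs
theorem pv_count_flatten (vals : List (List String)) (k : String) :
    List.count k ((vals.map PySem.Set.ofList).flatten)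
      = vals.countP (fun s => decide (k ∈ s)) := by
  induction vals with
  | nil => simp
  | cons v vs ih =>
      simp only [List.map_cons, List.flatten_cons, List.count_append, List.countP_cons, ih]
      by_cases h : k ∈ v
      · rw [List.count_eq_one_of_mem (PySem.Set.nodup_ofList v)
              ((PySem.Set.mem_ofList v k).mpr h)]
        simp [h, Nat.add_comm]
      · rw [List.count_eq_zero.mpr (fun hm => h ((PySem.Set.mem_ofList v k).mp hm))]
        simp [h]

-- A's intersection fold is a filter by membership in every remaining set
theorem pv_foldl_inter (ts : List (List String)) (s : PySem.Set String) :
    ts.foldl (fun acc t => PySem.Set.inter acc t) s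
      = s.filter (fun x => ts.all (fun t => PySem.Set.contains t x)) := by
  induction ts generalizing s with
  | nil => simp
  | cons t ts ih =>
      simp only [List.foldl_cons]
      rw [ih, PySem.Set.inter, List.filter_filter]
      apply List.filter_congr
      intro x _
      simp [Bool.and_comm]

-- values and size of a dict
theorem pv_values_length (d : PySem.Dict String (List String)) : d.size = d.values.length := by
  cases d; simp [PySem.Dict.values, PySem.Dict.size]

-- the common-friends computations agree on a non-trivial value list v :: vs
theorem pv_common (v : List String) (vs : List (List String)) :
    vs.foldl (fun acc s => PySem.Set.inter acc s) (PySem.Set.ofList v)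
      = (((PySem.Dict.counter ((((v :: vs).map PySem.Set.ofList)).flatten)).items.filter
          (fun p => p.2 == (((v :: vs).length : Nat) : Int))).map Prod.fst) := by
  rw [PySem.Dict.items_counter, List.filter_map, List.map_map]
  have hmapfst : (Prod.fst ∘ fun k => (k, (List.count k (((v :: vs).map PySem.Set.ofList).flatten) : Int)))
      = id := rfl
  rw [hmapfst, List.map_id]
  -- canonical predicate: member of every friend set
  have hq : ∀ k : String,
      (((fun p : String × Int => p.2 == (((v :: vs).length : Nat) : Int)) ∘
        fun k => (k, (List.count k (((v :: vs).map PySem.Set.ofList).flatten) : Int))) k)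
      = decide (∀ s ∈ v :: vs, k ∈ s) := by
    intro k
    simp only [Function.comp, pv_count_flatten]
    rw [Bool.eq_iff_iff]
    simp only [beq_iff_eq, Nat.cast_inj, decide_eq_true_iff]
    simpa using (List.countP_eq_length (l := v :: vs) (p := fun s => decide (k ∈ s)))
  rw [List.filter_congr (fun x _ => hq x)]
  rw [pv_foldl_inter]
  -- restrict set(flattened) to set(v): every common friend lies in v
  have hofL : PySem.Set.ofList (((v :: vs).map PySem.Set.ofList).flatten)
      = PySem.Set.ofList v ++
        ((PySem.Set.ofList ((vs.map PySem.Set.ofList).flatten)).filter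
          (fun y => !(PySem.Set.contains (PySem.Set.ofList v) y))) := by
    simp only [List.map_cons, List.flatten_cons]
    rw [PySem.Set.ofList_append, PySem.Set.update_eq_append_filter, PySem.Set.ofList_ofList]
  rw [hofL, List.filter_append]
  have hnil : ((PySem.Set.ofList ((vs.map PySem.Set.ofList).flatten)).filter
        (fun y => !(PySem.Set.contains (PySem.Set.ofList v) y))).filter
        (fun k => decide (∀ s ∈ v :: vs, k ∈ s)) = [] := by
    rw [List.filter_eq_nil_iff]
    intro a ha
    rw [List.mem_filter] at ha
    simp only [Bool.not_eq_true', ← Bool.not_eq_true] at ha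
    have hav : a ∉ v := by
      intro hav
      exact ha.2 ((PySem.Set.contains_iff _ _).mpr ((PySem.Set.mem_ofList v a).mpr hav))
    simp only [decide_eq_true_iff]
    intro hall
    exact hav (hall v (List.mem_cons_self))
  rw [hnil, List.append_nil]
  apply List.filter_congr
  intro x hx
  have hxv : x ∈ v := (PySem.Set.mem_ofList v x).mp hx
  rw [Bool.eq_iff_iff]
  simp only [List.all_eq_true, decide_eq_true_iff]
  constructor
  · intro h s hs
    rcases List.mem_cons.mp hs with rfl | hs
    · exact hxv
    · exact (PySem.Set.contains_iff _ _).mp (h s hs)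
  · intro h s hs
    exact (PySem.Set.contains_iff _ _).mpr (h s (List.mem_cons_of_mem _ hs))

-- the two else-branch bodies agree, as a function of the value list alone
theorem pv_body (vals : List (List String)) :
    ((if 1 < vals.length then
        match vals with
        | [] => []
        | v :: vs => vs.foldl (fun acc s => PySem.Set.inter acc s) (PySem.Set.ofList v)
      else ([] : List String)),
     vals.foldl (fun acc s => PySem.Set.update acc s) ([] : List String))
    = ((if 1 < vals.length then
          (((vals.foldl
              (fun c s => (PySem.Set.ofList s).foldl (fun c f => c.modify f 0 (· + 1)) c)
              (PySem.Dict.empty : PySem.Dict String Int)).items.filter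
            (fun p => p.2 == (vals.length : Int))).map Prod.fst)
        else []),
       (vals.foldl
          (fun c s => (PySem.Set.ofList s).foldl (fun c f => c.modify f 0 (· + 1)) c)
          (PySem.Dict.empty : PySem.Dict String Int)).keys) := by
  rw [pv_counts_eq_counter]
  simp only [Prod.mk.injEq]
  constructor
  · -- common friends
    by_cases hn : 1 < vals.length
    · simp only [hn, if_true]
      obtain ⟨v, vs, hv⟩ : ∃ v vs, vals = v :: vs := by
        cases h : vals with
        | nil => rw [h] at hn; simp at hn
        | cons a l => exact ⟨a, l, rfl⟩
      rw [hv]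
      exact pv_common v vs
    · simp [hn]
  · -- all friends
    rw [PySem.Dict.keys_counter, pv_foldl_update, PySem.Set.update_nil_left]

-- ===== VERDICT (by name: the statement is the Claim_ definition above) =====
theorem find_common_and_all_friends_spec : Claim_equal_find_common_and_all_friends := by
  intro friends _
  unfold Spec_find_common_and_all_friends find_common_and_all_friends find_common_and_all_friends_alt
  by_cases hemp : friends.isEmpty
  · simp [hemp]
  · rw [if_neg hemp, if_neg hemp]
    simp only [pv_values_length]
    exact pv_body (PySem.Dict.ofList friends).values
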